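-- pv_equiv track=rewrite | github.com/jahongir1511/8-3-darspaftor | 8.4darspaftor/main3.py | duplicate_sandwich
-- ===== SOURCE A (Python) =====
-- def duplicate_sandwich(seq):
--     positions = {}
--     max_length = 0
--     result = []
--
--     for i, element in enumerate(seq):
--         if element in positions:
--             start = positions[element]
--             subseq = seq[start + 1:i]
--             if len(subseq) > max_length:
--                 max_length = len(subseq)
--                 result = subseq
--         positions[element] = i
--
--     return result
-- ===== SOURCE B (Python) =====
-- def duplicate_sandwich(seq):
--     # Stage 1: group all occurrence indices by value.
--     occ = {}
--     for i, x in enumerate(seq):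
--         occ.setdefault(x, []).append(i)
--     # Stage 2: every gap sits between two consecutive occurrences of one value.
--     pairs = [(nxt - prv - 1, nxt, prv)
--              for idxs in occ.values()
--              for prv, nxt in zip(idxs, idxs[1:])]
--     # Stage 3: pick the widest gap; ties broken by the earliest end index.
--     gap, end, start = max(pairs, key=lambda t: (t[0], -t[1]), default=(0, 0, -1))
--     return seq[start + 1:end]
-- ===== Notes on version B (the rewrite author's own statement) =====
-- stated objective: faster
-- what changed: Instead of slicing the sequence at every repeated element during one dict-scan, B works in three stages: it groups all occurrence indices by value, lists the (gap, end, start) triple of every pair of consecutive occurrences, and selects the widest gap with one max over a (gap, -end) key, slicing exactly once.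
import Mathlib
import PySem

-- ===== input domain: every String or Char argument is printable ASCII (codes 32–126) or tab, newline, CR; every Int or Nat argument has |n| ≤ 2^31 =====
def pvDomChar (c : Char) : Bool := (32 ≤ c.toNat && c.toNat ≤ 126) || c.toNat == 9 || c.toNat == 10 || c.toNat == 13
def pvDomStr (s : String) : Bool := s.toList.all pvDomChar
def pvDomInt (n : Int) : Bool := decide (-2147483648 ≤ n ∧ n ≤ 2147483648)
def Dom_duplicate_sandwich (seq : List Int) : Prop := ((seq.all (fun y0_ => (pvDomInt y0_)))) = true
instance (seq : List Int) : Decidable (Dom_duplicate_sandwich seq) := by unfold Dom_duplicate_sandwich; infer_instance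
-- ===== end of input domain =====

-- B replaces A's one-pass slice-per-duplicate scan by three stages: group occurrence
-- indices by value, list the gaps between consecutive occurrences, take one max (faster).

-- ===== PORT A =====
def dsLoopA (seq : List Int) : List (Int × Int) → PySem.Dict Int Int → Int → List Int → List Int
  | [], _, _, res => res
  | (i, x) :: rest, pos, ml, res =>
    match pos.get? x with
    | some start =>
        let sub := PySem.List.slice seq (some (start + 1)) (some i)
        if (sub.length : Int) > ml then
          dsLoopA seq rest (pos.insert x i) (sub.length : Int) sub
        else
          dsLoopA seq rest (pos.insert x i) ml res
    | none => dsLoopA seq rest (pos.insert x i) ml res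

def duplicate_sandwich (seq : List Int) : List Int :=
  dsLoopA seq (PySem.List.enumerate seq 0) PySem.Dict.empty 0 []

-- ===== PORT B =====
-- Stage 1: group all occurrence indices by value (occ.setdefault(x, []).append(i)).
def bGroup (seq : List Int) : PySem.Dict Int (List Int) :=
  (PySem.List.enumerate seq 0).foldl (fun d p => d.modify p.2 [] (· ++ [p.1])) PySem.Dict.empty

-- Stage 2 inner comprehension: gaps between consecutive occurrences of one value.
def bPairs (idxs : List Int) : List (Int × Int × Int) :=
  (idxs.zip idxs.tail).map (fun q => (q.2 - q.1 - 1, q.2, q.1))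

def duplicate_sandwich_alt (seq : List Int) : List Int :=
  let occ := bGroup seq
  let pairs := (PySem.Dict.values occ).flatMap bPairs
  -- Stage 3: max(pairs, key=lambda t: (t[0], -t[1]), default=(0, 0, -1))
  let best := (PySem.List.max2? pairs (fun t => t.1) (fun t => -t.2.1)).getD (0, 0, -1)
  PySem.List.slice seq (some (best.2.2 + 1)) (some best.2.1)

-- ===== PRECONDITION & SPEC =====
def Spec_duplicate_sandwich (seq : List Int) (out : List Int) : Prop := out = duplicate_sandwich_alt seq
instance (seq : List Int) (out : List Int) : Decidable (Spec_duplicate_sandwich seq out) := by unfold Spec_duplicate_sandwich; infer_instance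

-- ===== CLAIM (what is proved, stated in full; the proofs are below) =====
def Claim_equal_duplicate_sandwich : Prop := ∀ (seq : List Int), Dom_duplicate_sandwich seq → Spec_duplicate_sandwich seq (duplicate_sandwich seq)

-- ===== LEMMAS AND PROOFS =====
def cScan : List (Int × Int) → PySem.Dict Int Int → List (Int × Int × Int)
  | [], _ => []
  | (i, x) :: rest, pos =>
    (match pos.get? x with
     | some j => [(i - j - 1, i, j)]
     | none => []) ++ cScan rest (pos.insert x i)

def posAfter (es : List (Int × Int)) (d : PySem.Dict Int Int) : PySem.Dict Int Int :=
  es.foldl (fun d p => d.insert p.2 p.1) d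

def occList (seq : List Int) (v : Int) : List Int :=
  ((PySem.List.enumerate seq 0).filter (fun p => p.2 == v)).map (·.1)

def pcList (seq : List Int) : List (Int × Int × Int) :=
  (PySem.Set.ofList seq).flatMap (fun x => bPairs (occList seq x))

-- split cScan at any point
lemma cScan_append (es fs : List (Int × Int)) (pos : PySem.Dict Int Int) :
    cScan (es ++ fs) pos = cScan es pos ++ cScan fs (posAfter es pos) := by
  induction es generalizing pos with
  | nil => simp [cScan, posAfter]
  | cons p es ih =>
      obtain ⟨i, x⟩ := p
      simp only [List.cons_append, cScan]
      rw [ih]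
      simp [posAfter, List.append_assoc]

-- the last-position dict looks up the last occurrence index
lemma posAfter_get? (es : List (Int × Int)) (d : PySem.Dict Int Int) (v : Int) :
    (posAfter es d).get? v
      = (match ((es.filter (fun p => p.2 == v)).map (·.1)).getLast? with
         | some j => some j
         | none => d.get? v) := by
  induction es generalizing d with
  | nil => simp [posAfter]
  | cons p es ih =>
      obtain ⟨i, x⟩ := p
      have : posAfter ((i, x) :: es) d = posAfter es (d.insert x i) := rfl
      rw [this, ih]
      by_cases hx : x = v
      · subst hx
        simp only [List.filter_cons, beq_self_eq_true, if_pos]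
        cases hL : ((es.filter (fun p => p.2 == x)).map (·.1)).getLast? with
        | some j => simp [hL, List.getLast?_cons]
        | none =>
            have hnil : (es.filter (fun p => p.2 == x)).map (·.1) = [] := by
              cases h : (es.filter (fun p => p.2 == x)).map (·.1) with
              | nil => rfl
              | cons a l => rw [h] at hL; simp at hL
            simp [List.map_cons, hnil, PySem.Dict.get?_insert_self]
      · have hbeq : (x == v) = false := by simp [hx]
        have hne : v ≠ x := fun h => hx (Eq.symm h)
        simp only [List.filter_cons, hbeq, Bool.false_eq_true, if_neg, not_false_iff]
        cases ((es.filter (fun p => p.2 == v)).map (·.1)).getLast? with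
        | some j => rfl
        | none => exact PySem.Dict.get?_insert_of_ne d i hne

-- occList of a snoc
lemma occList_snoc (seq : List Int) (w v : Int) :
    occList (seq ++ [w]) v = occList seq v ++ (if w == v then [(seq.length : Int)] else []) := by
  unfold occList
  rw [PySem.List.enumerate_append]
  simp only [List.filter_append, List.map_append]
  congr 1
  simp [PySem.List.enumerate_cons, PySem.List.enumerate_nil, List.filter_cons]
  by_cases h : w = v <;> simp [h]

lemma occList_nil_iff (seq : List Int) (v : Int) : occList seq v = [] ↔ v ∉ seq := by
  unfold occList
  simp only [List.map_eq_nil_iff, List.filter_eq_nil_iff]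
  constructor
  · intro h hv
    obtain ⟨k, hk, rfl⟩ := List.mem_iff_getElem.mp hv
    exact h ((0 + (k:Int), seq[k])) (by
      rw [PySem.List.mem_enumerate_iff]; exact ⟨k, hk, rfl⟩) (by simp)
  · intro hv p hp hb
    rw [PySem.List.mem_enumerate_iff] at hp
    obtain ⟨k, hk, rfl⟩ := hp
    simp at hb
    exact hv (hb ▸ List.getElem_mem hk)

-- every element of occList is a Nat index below len
lemma occList_mem (seq : List Int) (v j : Int) (hj : j ∈ occList seq v) :
    ∃ k : Nat, j = (k : Int) ∧ k < seq.length := by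
  unfold occList at hj
  obtain ⟨p, hp, rfl⟩ := List.mem_map.mp hj
  have hp' := List.mem_of_mem_filter hp
  rw [PySem.List.mem_enumerate_iff] at hp'
  obtain ⟨k, hk, rfl⟩ := hp'
  exact ⟨k, by simp, hk⟩

-- bPairs of a snoc
lemma bPairs_snoc (l : List Int) (n : Int) :
    bPairs (l ++ [n]) = bPairs l ++ (match l.getLast? with
                                     | some j => [(n - j - 1, n, j)]
                                     | none => []) := by
  induction l with
  | nil => simp [bPairs]
  | cons a l ih =>
      cases l with
      | nil => simp [bPairs]
      | cons b l' =>
          have h1 : bPairs ((a :: b :: l') ++ [n]) = (b - a - 1, b, a) :: bPairs ((b :: l') ++ [n]) := by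
            simp [bPairs]
          have h2 : bPairs (a :: b :: l') = (b - a - 1, b, a) :: bPairs (b :: l') := by
            simp [bPairs]
          rw [h1, ih, h2]
          simp [List.getLast?_cons_cons]

-- the (at most one) new candidate contributed by appending w to seq
def newC (seq : List Int) (w : Int) : List (Int × Int × Int) :=
  match (occList seq w).getLast? with
  | some j => [((seq.length : Int) - j - 1, (seq.length : Int), j)]
  | none => []

lemma cScan_snoc (seq : List Int) (w : Int) :
    cScan (PySem.List.enumerate (seq ++ [w]) 0) PySem.Dict.empty
      = cScan (PySem.List.enumerate seq 0) PySem.Dict.empty ++ newC seq w := by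
  rw [PySem.List.enumerate_append, cScan_append]
  congr 1
  have h1 : PySem.List.enumerate [w] (0 + (seq.length : Int)) = [((seq.length : Int), w)] := by
    simp [PySem.List.enumerate_cons, PySem.List.enumerate_nil]
  rw [h1]
  show (match (posAfter (PySem.List.enumerate seq 0) PySem.Dict.empty).get? w with
        | some j => [((seq.length : Int) - j - 1, (seq.length : Int), j)]
        | none => []) ++ cScan [] _ = newC seq w
  rw [posAfter_get?]
  unfold newC occList
  cases ((((PySem.List.enumerate seq 0)).filter (fun p => p.2 == w)).map (·.1)).getLast? with
  | some j => simp [cScan]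
  | none => simp [cScan, PySem.Dict.get?_empty]

lemma pc_snoc_perm (seq : List Int) (w : Int) :
    (pcList (seq ++ [w])).Perm (pcList seq ++ newC seq w) := by
  by_cases hw : w ∈ seq
  · -- w occurs: its group gains one index, one new pair appears inside the flatMap
    have hset : PySem.Set.ofList (seq ++ [w]) = PySem.Set.ofList seq := by
      rw [PySem.Set.ofList_append_singleton, PySem.Set.add_of_mem ((PySem.Set.mem_ofList seq w).mpr hw)]
    obtain ⟨u1, u2, hsplit⟩ := List.append_of_mem ((PySem.Set.mem_ofList seq w).mpr hw)
    have hnd : (PySem.Set.ofList seq).Nodup := PySem.Set.nodup_ofList seq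
    rw [hsplit] at hnd
    have hdisj := List.disjoint_of_nodup_append hnd
    have hw1 : w ∉ u1 := fun h => hdisj h List.mem_cons_self
    have hw2 : w ∉ u2 := (List.nodup_cons.mp (hnd.sublist (List.sublist_append_right u1 _))).1
    unfold pcList
    rw [hset, hsplit]
    simp only [List.flatMap_append, List.flatMap_cons]
    have hu1 : ∀ x ∈ u1, bPairs (occList (seq ++ [w]) x) = bPairs (occList seq x) := by
      intro x hx
      congr 1
      rw [occList_snoc]
      have : (w == x) = false := by simp; intro h; exact hw1 (h ▸ hx)
      simp [this]
    have hu2 : ∀ x ∈ u2, bPairs (occList (seq ++ [w]) x) = bPairs (occList seq x) := by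
      intro x hx
      congr 1
      rw [occList_snoc]
      have : (w == x) = false := by simp; intro h; exact hw2 (h ▸ hx)
      simp [this]
    have hmid : bPairs (occList (seq ++ [w]) w) = bPairs (occList seq w) ++ newC seq w := by
      rw [occList_snoc]
      simp only [beq_self_eq_true, if_pos]
      rw [bPairs_snoc]
      unfold newC
      rfl
    rw [List.flatMap_congr hu1, List.flatMap_congr hu2, hmid]
    apply List.perm_iff_count.mpr
    intro a
    simp [List.count_append]
    omega
  · -- w is new: ofList gains w whose group is a singleton, so no new pair
    have hnew : occList seq w = [] := (occList_nil_iff seq w).mpr hw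
    have hnc : newC seq w = [] := by unfold newC; rw [hnew]; rfl
    rw [hnc, List.append_nil]
    have hset : PySem.Set.ofList (seq ++ [w]) = PySem.Set.ofList seq ++ [w] := by
      rw [PySem.Set.ofList_append_singleton,
          PySem.Set.add_of_not_mem (fun h => hw ((PySem.Set.mem_ofList seq w).mp h))]
    unfold pcList
    rw [hset, List.flatMap_append]
    have hu : ∀ x ∈ PySem.Set.ofList seq, bPairs (occList (seq ++ [w]) x) = bPairs (occList seq x) := by
      intro x hx
      have hxseq : x ∈ seq := (PySem.Set.mem_ofList seq x).mp hx
      congr 1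
      rw [occList_snoc]
      have : (w == x) = false := by simp; intro h; exact hw (h ▸ hxseq)
      simp [this]
    rw [List.flatMap_congr hu]
    have hwlast : (occList (seq ++ [w]) w) = [(seq.length : Int)] := by
      rw [occList_snoc, hnew]; simp
    simp [hwlast, bPairs]

lemma cScan_perm_pc (seq : List Int) :
    (cScan (PySem.List.enumerate seq 0) PySem.Dict.empty).Perm (pcList seq) := by
  induction seq using List.reverseRecOn with
  | nil => simp [PySem.List.enumerate_nil, cScan, pcList, PySem.Set.ofList_nil]
  | append_singleton seq w ih =>
      rw [cScan_snoc]
      exact (ih.append_right (newC seq w)).trans (pc_snoc_perm seq w).symm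

lemma newC_shape (seq : List Int) (w : Int) (c : Int × Int × Int) (hc : c ∈ newC seq w) :
    ∃ s : Nat, c = (((seq.length : Int) - s - 1), (seq.length : Int), (s : Int)) ∧ s < seq.length := by
  unfold newC at hc
  cases hL : (occList seq w).getLast? with
  | none => rw [hL] at hc; simp at hc
  | some j =>
      rw [hL] at hc
      have hj : j ∈ occList seq w := List.mem_of_getLast? hL
      obtain ⟨k, rfl, hk⟩ := occList_mem seq w j hj
      simp at hc
      exact ⟨k, hc, hk⟩

lemma cScan_range (seq : List Int) :
    ∀ c ∈ cScan (PySem.List.enumerate seq 0) PySem.Dict.empty,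
      ∃ s e : Nat, c.2.2 = (s : Int) ∧ c.2.1 = (e : Int) ∧ s < e ∧ e < seq.length ∧ c.1 = (e : Int) - s - 1 := by
  induction seq using List.reverseRecOn with
  | nil => simp [PySem.List.enumerate_nil, cScan]
  | append_singleton seq w ih =>
      rw [cScan_snoc]
      intro c hc
      rcases List.mem_append.mp hc with h | h
      · obtain ⟨s, e, h1, h2, h3, h4, h5⟩ := ih c h
        exact ⟨s, e, h1, h2, h3, by simp; omega, h5⟩
      · obtain ⟨s, hc', hs⟩ := newC_shape seq w c h
        subst hc'
        exact ⟨s, seq.length, rfl, rfl, hs, by simp, rfl⟩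

lemma cScan_ends (seq : List Int) :
    (cScan (PySem.List.enumerate seq 0) PySem.Dict.empty).Pairwise (fun a b => a.2.1 < b.2.1) := by
  induction seq using List.reverseRecOn with
  | nil => simp [PySem.List.enumerate_nil, cScan]
  | append_singleton seq w ih =>
      rw [cScan_snoc]
      apply List.pairwise_append.mpr
      refine ⟨ih, ?_, ?_⟩
      · unfold newC
        cases (occList seq w).getLast? <;> simp
      · intro a ha b hb
        obtain ⟨s, e, _, h2, _, h4, _⟩ := cScan_range seq a ha
        obtain ⟨t, hb', _⟩ := newC_shape seq w b hb
        subst hb'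
        rw [h2]
        show (e : Int) < ((seq.length : Int) - t - 1, (seq.length : Int), (t : Int)).2.1
        simp only []
        exact_mod_cast h4
def sFold : List (Int × Int × Int) → (Int × Int × Int) → (Int × Int × Int)
  | [], b => b
  | c :: rest, b => sFold rest (if c.1 > b.1 then c else b)

def sliceOf (seq : List Int) (b : Int × Int × Int) : List Int :=
  PySem.List.slice seq (some (b.2.2 + 1)) (some b.2.1)

lemma dsLoop_eq (seq : List Int) :
    ∀ (tail : List Int) (n : Nat) (pos : PySem.Dict Int Int) (ml : Int) (res : List Int)
      (bl bs be : Int),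
      seq.drop n = tail →
      (∀ k v, pos.get? k = some v → ∃ m : Nat, v = (m : Int) ∧ m < n) →
      bl = ml →
      res = sliceOf seq (bl, bs, be) →
      ml = (res.length : Int) →
      dsLoopA seq (PySem.List.enumerate tail (n : Int)) pos ml res
        = sliceOf seq (sFold (cScan (PySem.List.enumerate tail (n : Int)) pos) (bl, bs, be)) := by
  intro tail
  induction tail with
  | nil =>
      intro n pos ml res bl bs be _ _ _ hres _
      simp [PySem.List.enumerate_nil, dsLoopA, cScan, sFold, hres]
  | cons x tail' ih =>
      intro n pos ml res bl bs be hdrop hp hbl hres hml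
      have hdrop' : seq.drop (n + 1) = tail' := by
        have h1 : seq.drop (n + 1) = (seq.drop n).drop 1 := by
          rw [List.drop_drop, Nat.add_comm]
        rw [h1, hdrop]
        rfl
      have hn : n < seq.length := by
        by_contra h
        rw [List.drop_eq_nil_of_le (by omega)] at hdrop
        simp at hdrop
      have hcast : (n : Int) + 1 = ((n + 1 : Nat) : Int) := by push_cast; ring
      rw [PySem.List.enumerate_cons, hcast]
      have hp' : ∀ k v, (pos.insert x (n : Int)).get? k = some v →
          ∃ m : Nat, v = (m : Int) ∧ m < n + 1 := by
        intro k v hv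
        rw [PySem.Dict.get?_insert] at hv
        by_cases hk : k = x
        · simp [hk] at hv
          exact ⟨n, hv.symm, by omega⟩
        · simp [hk] at hv
          obtain ⟨m, hm1, hm2⟩ := hp k v hv
          exact ⟨m, hm1, by omega⟩
      simp only [dsLoopA, cScan]
      cases hget : pos.get? x with
      | none =>
          simp only [List.nil_append]
          exact ih (n + 1) _ ml res bl bs be hdrop' hp' hbl hres hml
      | some j =>
          obtain ⟨m, rfl, hmn⟩ := hp x j hget
          simp only [List.cons_append, List.nil_append, sFold]
          have hm1 : (m : Int) + 1 = ((m + 1 : Nat) : Int) := by push_cast; ring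
          have hsub : PySem.List.slice seq (some ((m : Int) + 1)) (some (n : Int))
              = List.take (n - (m + 1)) (List.drop (m + 1) seq) := by
            rw [hm1, PySem.List.slice_natCast]
          have hsublen : ((PySem.List.slice seq (some ((m : Int) + 1)) (some (n : Int))).length : Int)
              = (n : Int) - (m : Int) - 1 := by
            rw [hsub]
            simp [List.length_take, List.length_drop]
            omega
          by_cases hc : ((PySem.List.slice seq (some ((m : Int) + 1)) (some (n : Int))).length : Int) > ml
          · have hcB : (n : Int) - (m : Int) - 1 > bl := by rw [hbl]; omega
            rw [if_pos hc, if_pos hcB, hsublen]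
            exact ih (n + 1) _ _ _ _ _ _ hdrop' hp' rfl rfl hsublen.symm
          · have hcB : ¬ ((n : Int) - (m : Int) - 1 > bl) := by rw [hbl]; omega
            simp only [gt_iff_lt, not_lt] at hc hcB
            simp only [if_neg (not_lt.mpr hc), if_neg (not_lt.mpr hcB)]
            exact ih (n + 1) _ ml res bl bs be hdrop' hp' hbl hres hml

lemma duplicate_sandwich_eq_sFold (seq : List Int) :
    duplicate_sandwich seq = sliceOf seq (sFold (cScan (PySem.List.enumerate seq 0) PySem.Dict.empty) (0, 0, 0)) := by
  unfold duplicate_sandwich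
  have h := dsLoop_eq seq seq 0 PySem.Dict.empty 0 [] 0 0 0 rfl
    (by intro k v hv; simp [PySem.Dict.get?_empty] at hv)
    rfl
    (by unfold sliceOf; rw [PySem.List.slice_toNat seq (by norm_num) (by norm_num)]; simp)
    rfl
  simpa using h
lemma bGroup_getD (seq : List Int) (v : Int) : (bGroup seq).getD v [] = occList seq v := by
  unfold bGroup occList
  have hmap : (PySem.List.enumerate seq 0).foldl (fun d p => d.modify p.2 [] (· ++ [p.1])) PySem.Dict.empty
      = ((PySem.List.enumerate seq 0).map (fun p => (p.2, p.1))).foldl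
          (fun d q => d.modify q.1 [] (· ++ [q.2])) PySem.Dict.empty := by
    rw [List.foldl_map]
  rw [hmap, PySem.Dict.getD_foldl_modify_append]
  rw [List.filter_map]
  simp only [List.map_map]
  simp [PySem.Dict.getD_empty, Function.comp_def]
lemma bGroup_keys (seq : List Int) : (bGroup seq).keys = PySem.Set.ofList seq := by
  unfold bGroup
  rw [PySem.Dict.keys_foldl_modify_key]
  rw [PySem.List.map_snd_enumerate]
  simp [PySem.Set.update_nil_left, PySem.Dict.keys_empty]

lemma bGroup_nodup (seq : List Int) : (bGroup seq).keys.Nodup := by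
  rw [bGroup_keys]; exact PySem.Set.nodup_ofList seq

lemma alt_eq_max (seq : List Int) :
    duplicate_sandwich_alt seq
      = sliceOf seq ((PySem.List.max2? (pcList seq) (fun t => t.1) (fun t => -t.2.1)).getD (0, 0, -1)) := by
  unfold duplicate_sandwich_alt sliceOf
  simp only []
  have hv : (PySem.Dict.values (bGroup seq)) = (PySem.Set.ofList seq).map (fun x => occList seq x) := by
    rw [PySem.Dict.values_eq_map_keys (bGroup seq) (bGroup_nodup seq) []]
    rw [bGroup_keys]
    exact List.map_congr_left (fun x _ => bGroup_getD seq x)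
  rw [hv]
  have : ((PySem.Set.ofList seq).map (fun x => occList seq x)).flatMap bPairs = pcList seq := by
    unfold pcList
    rw [List.flatMap_map]
  rw [this]
def klt (a b : Int × Int × Int) : Prop := a.1 < b.1 ∨ (a.1 = b.1 ∧ b.2.1 < a.2.1)

lemma klt_irrefl (a : Int × Int × Int) : ¬ klt a a := by unfold klt; omega

lemma klt_trans {a b c : Int × Int × Int} (h1 : klt a b) (h2 : klt b c) : klt a c := by
  unfold klt at *; omega

lemma exists_max : ∀ (l : List (Int × Int × Int)), l ≠ [] →
    l.Pairwise (fun a b => a.2.1 < b.2.1) →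
    ∃ m ∈ l, ∀ y ∈ l, y = m ∨ klt y m := by
  intro l
  induction l with
  | nil => intro h; exact absurd rfl h
  | cons a l ih =>
      intro _ hp
      cases l with
      | nil => exact ⟨a, List.mem_cons_self, by intro y hy; simp at hy; left; exact hy⟩
      | cons b l' =>
          obtain ⟨m, hm, hmax⟩ := ih (by simp) (List.Pairwise.of_cons hp)
          have hend : a.2.1 < m.2.1 := (List.pairwise_cons.mp hp).1 m hm
          by_cases hc : a.1 < m.1
          · refine ⟨m, List.mem_cons_of_mem a hm, ?_⟩
            intro y hy
            rcases List.mem_cons.mp hy with rfl | hy'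
            · right; left; exact hc
            · exact hmax y hy'
          · have hma : klt m a := by unfold klt; omega
            refine ⟨a, List.mem_cons_self, ?_⟩
            intro y hy
            rcases List.mem_cons.mp hy with rfl | hy'
            · left; rfl
            · right
              rcases hmax y hy' with rfl | hym
              · exact hma
              · exact klt_trans hym hma

lemma sFold_const : ∀ (l : List (Int × Int × Int)) (b), (∀ y ∈ l, ¬ (y.1 > b.1)) → sFold l b = b := by
  intro l
  induction l with
  | nil => intro b _; rfl
  | cons c rest ih =>
      intro b h
      simp only [sFold, if_neg (h c List.mem_cons_self)]
      exact ih b (fun y hy => h y (List.mem_cons_of_mem c hy))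

lemma sFold_eq : ∀ (l : List (Int × Int × Int)) (b m), m ∈ l →
    (∀ y ∈ l, y = m ∨ klt y m) →
    l.Pairwise (fun a b => a.2.1 < b.2.1) →
    b.1 < m.1 → sFold l b = m := by
  intro l
  induction l with
  | nil => intro b m hm; simp at hm
  | cons c rest ih =>
      intro b m hm hall hp hb
      by_cases hcm : c = m
      · subst hcm
        simp only [sFold, if_pos (by omega : c.1 > b.1)]
        apply sFold_const
        intro y hy
        rcases hall y (List.mem_cons_of_mem c hy) with rfl | hy'
        · exact absurd ((List.pairwise_cons.mp hp).1 y hy) (lt_irrefl _)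
        · unfold klt at hy'; omega
      · have hcl : klt c m := (hall c List.mem_cons_self).resolve_left hcm
        have hmrest : m ∈ rest := (List.mem_cons.mp hm).resolve_left (fun h => hcm h.symm)
        have hce : c.2.1 < m.2.1 := (List.pairwise_cons.mp hp).1 m hmrest
        have hc1 : c.1 < m.1 := by unfold klt at hcl; omega
        simp only [sFold]
        apply ih _ m hmrest (fun y hy => hall y (List.mem_cons_of_mem c hy)) (List.Pairwise.of_cons hp)
        split_ifs <;> omega

-- Python's max(..., key=lambda t: (t[0], -t[1])) kept as an abstract fold step
lemma maxfold_eq (f : Option (Int × Int × Int) → (Int × Int × Int) → Option (Int × Int × Int))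
    (hf2 : ∀ mm x, klt mm x → f (some mm) x = some x)
    (hf3 : ∀ mm x, ¬ klt mm x → f (some mm) x = some mm) :
    ∀ (l : List (Int × Int × Int)) (b m : Int × Int × Int),
    (∀ y ∈ l, y = m ∨ klt y m) →
    (b = m ∨ (klt b m ∧ m ∈ l)) →
    List.foldl f (some b) l = some m := by
  intro l
  induction l with
  | nil =>
      intro b m _ hb
      rcases hb with rfl | ⟨_, h⟩
      · rfl
      · simp at h
  | cons c rest ih =>
      intro b m hall hb
      simp only [List.foldl_cons]
      by_cases hkc : klt b c
      · rw [hf2 b c hkc]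
        apply ih
        · intro y hy; exact hall y (List.mem_cons_of_mem c hy)
        · rcases hall c List.mem_cons_self with rfl | hcm
          · left; rfl
          · right
            refine ⟨hcm, ?_⟩
            rcases hb with rfl | ⟨hbm, hml⟩
            · exact absurd hkc (fun h => klt_irrefl c (klt_trans hcm h))
            · rcases List.mem_cons.mp hml with rfl | h
              · exact absurd hcm (klt_irrefl m)
              · exact h
      · rw [hf3 b c hkc]
        apply ih
        · intro y hy; exact hall y (List.mem_cons_of_mem c hy)
        · rcases hb with rfl | ⟨hbm, hml⟩
          · left; rfl
          · rcases List.mem_cons.mp hml with rfl | h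
            · exact absurd hbm hkc
            · exact Or.inr ⟨hbm, h⟩

lemma max2?_eq (l : List (Int × Int × Int)) (m : Int × Int × Int) (hm : m ∈ l)
    (hall : ∀ y ∈ l, y = m ∨ klt y m) :
    PySem.List.max2? l (fun t => t.1) (fun t => -t.2.1) = some m := by
  have hcond : ∀ (u v : Int × Int × Int),
      ((decide (u.1 < v.1) || !decide (v.1 < u.1) && decide (-u.2.1 < -v.2.1)) = true) ↔ klt u v := by
    intro u v; unfold klt; simp; omega
  cases l with
  | nil => simp at hm
  | cons c rest =>
      show List.foldl _ (some c) rest = some m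
      apply maxfold_eq
      · intro mm x h
        show (if (decide (mm.1 < x.1) || !decide (x.1 < mm.1) && decide (-mm.2.1 < -x.2.1)) = true
              then some x else some mm) = some x
        rw [if_pos ((hcond mm x).mpr h)]
      · intro mm x h
        show (if (decide (mm.1 < x.1) || !decide (x.1 < mm.1) && decide (-mm.2.1 < -x.2.1)) = true
              then some x else some mm) = some mm
        rw [if_neg (fun hh => h ((hcond mm x).mp hh))]
      · intro y hy; exact hall y (List.mem_cons_of_mem c hy)
      · rcases hall c List.mem_cons_self with rfl | hcm
        · left; rfl
        · right
          refine ⟨hcm, (List.mem_cons.mp hm).resolve_left ?_⟩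
          rintro rfl
          exact klt_irrefl m hcm

-- ===== VERDICT (by name: the statement is the Claim_ definition above) =====
theorem duplicate_sandwich_spec : Claim_equal_duplicate_sandwich := by
  intro seq _
  unfold Spec_duplicate_sandwich
  rw [duplicate_sandwich_eq_sFold, alt_eq_max]
  have hperm := cScan_perm_pc seq
  have hends := cScan_ends seq
  have hrange := cScan_range seq
  by_cases hM : cScan (PySem.List.enumerate seq 0) PySem.Dict.empty = []
  · have hP : pcList seq = [] := by
      rw [hM] at hperm
      exact hperm.symm.eq_nil
    rw [hM, hP]
    show sliceOf seq (sFold [] (0, 0, 0)) = sliceOf seq _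
    unfold sliceOf sFold
    have hmx : PySem.List.max2? ([] : List (Int × Int × Int)) (fun t => t.1) (fun t => -t.2.1) = none := rfl
    rw [hmx]
    simp only [Option.getD_none]
    rw [PySem.List.slice_toNat seq (by norm_num) (by norm_num),
        PySem.List.slice_toNat seq (by norm_num) (by norm_num)]
    simp
  · obtain ⟨m, hmM, hmax⟩ := exists_max _ hM hends
    have hmP : m ∈ pcList seq := hperm.mem_iff.mp hmM
    have hallP : ∀ y ∈ pcList seq, y = m ∨ klt y m := fun y hy => hmax y (hperm.mem_iff.mpr hy)
    rw [max2?_eq _ m hmP hallP]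
    simp only [Option.getD_some]
    obtain ⟨s, e, hs, he, hlt, _, hgap⟩ := hrange m hmM
    by_cases hpos : 0 < m.1
    · rw [sFold_eq _ (0, 0, 0) m hmM hmax hends (by simpa using hpos)]
    · have h1 : sFold (cScan (PySem.List.enumerate seq 0) PySem.Dict.empty) (0, 0, 0) = (0, 0, 0) := by
        apply sFold_const
        intro y hy
        rcases hmax y hy with rfl | h
        · simpa using hpos
        · unfold klt at h
          simp only [gt_iff_lt, not_lt]
          omega
      rw [h1]
      have he1 : e = s + 1 := by omega
      unfold sliceOf
      rw [PySem.List.slice_toNat seq (by norm_num) (by norm_num)]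
      rw [hs, he, he1]
      have : (s : Int) + 1 = ((s + 1 : Nat) : Int) := by push_cast; ring
      rw [this, PySem.List.slice_natCast]
      simp
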